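-- pv_equiv track=rewrite | github.com/demycata/primer_parcial | BibliotecaDemy.py | mayor_inpar
-- ===== SOURCE A (Python) =====
-- def mayor_inpar(lista:list) -> int | None:
--     """
--     Función para encontrar el número impar más grande en una lista.
--     Args:
--         lista: list[int]: Lista de números enteros.
--     Returns:
--         int | None: El número impar más grande en la lista, o None si no hay impares.
--     """
--     mayor = None
--     for i in range(len(lista)):
--         if lista[i] % 2 != 0:
--             if mayor == None:
--                 mayor = lista[i]
--             elif lista[i] > mayor:
--                 mayor = lista[i]
--     return mayor
-- ===== SOURCE B (Python) =====
-- def mayor_inpar(lista: list) -> int | None: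
--     """Largest odd number in the list, or None if there are no odd numbers.
--
--     Sort-then-scan: sort descending, the first odd element seen is the answer.
--     """
--     for x in sorted(lista, reverse=True):
--         if x % 2 != 0:
--             return x
--     return None
-- ===== Notes on version B (the rewrite author's own statement) =====
-- stated objective: alternative
-- what changed: B sorts the list in descending order and early-returns the first odd element (sort-then-scan), instead of A's single fused pass that tracks a running maximum over the odd elements; correct because in a descending order the first odd element is the largest odd one.
import Mathlib
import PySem

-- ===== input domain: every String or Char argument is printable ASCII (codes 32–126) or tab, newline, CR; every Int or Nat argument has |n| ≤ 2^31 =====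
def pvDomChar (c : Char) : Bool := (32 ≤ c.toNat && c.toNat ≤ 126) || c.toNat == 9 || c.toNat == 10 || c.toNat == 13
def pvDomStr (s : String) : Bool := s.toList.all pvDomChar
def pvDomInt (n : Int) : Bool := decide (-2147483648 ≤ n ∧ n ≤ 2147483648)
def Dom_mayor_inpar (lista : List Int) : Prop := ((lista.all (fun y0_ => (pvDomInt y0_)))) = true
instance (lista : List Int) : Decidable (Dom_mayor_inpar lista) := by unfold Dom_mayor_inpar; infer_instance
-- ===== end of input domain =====

-- B replaces A's fused filter-and-running-max pass by sort-descending-then-return-first-odd.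

-- ===== PORT A =====
-- index loop over range(len(lista)); lista[i] is always in range, ported with pyGetD
def mayor_inpar (lista : List Int) : Option Int :=
  (PySem.List.pyRange 0 lista.length 1).foldl
    (fun mayor i =>
      let x := PySem.List.pyGetD lista i 0
      if PySem.Int.mod x 2 ≠ 0 then
        match mayor with
        | none => some x
        | some m => if x > m then some x else mayor
      else mayor) none

-- ===== PORT B =====
-- 'for x in sorted(lista, reverse=True): if x % 2 != 0: return x' — the loop with an
-- early return is exactly find? over the descending-sorted list
def mayor_inpar_alt (lista : List Int) : Option Int :=
  (PySem.List.sorted lista (fun x => x) true).find? (fun x => decide (PySem.Int.mod x 2 ≠ 0))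

-- ===== PRECONDITION & SPEC =====
def Spec_mayor_inpar (lista : List Int) (out : Option Int) : Prop := out = mayor_inpar_alt lista
instance (lista : List Int) (out : Option Int) : Decidable (Spec_mayor_inpar lista out) := by unfold Spec_mayor_inpar; infer_instance

-- ===== CLAIM =====
def Claim_equal_mayor_inpar : Prop := ∀ (lista : List Int), Dom_mayor_inpar lista → Spec_mayor_inpar lista (mayor_inpar lista)

-- ===== LEMMAS AND PROOFS =====

def pvOdd (x : Int) : Bool := decide (PySem.Int.mod x 2 ≠ 0)

def pvStep (mayor : Option Int) (x : Int) : Option Int :=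
  if PySem.Int.mod x 2 ≠ 0 then
    match mayor with
    | none => some x
    | some m => if x > m then some x else mayor
  else mayor

lemma pvStep_some (m x : Int) :
    pvStep (some m) x = some (if PySem.Int.mod x 2 ≠ 0 then max m x else m) := by
  unfold pvStep
  split_ifs with h
  · rcases le_or_gt x m with h1 | h1
    · simp [not_lt.mpr h1, max_eq_left h1]
    · simp [h1, max_eq_right (le_of_lt h1)]
  · simp

lemma pvFold_some (l : List Int) (m : Int) :
    l.foldl pvStep (some m) = some ((l.filter pvOdd).foldl max m) := by
  induction l generalizing m with
  | nil => simp
  | cons x t ih =>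
    rw [List.foldl_cons, pvStep_some, List.filter_cons]
    by_cases h : PySem.Int.mod x 2 ≠ 0
    · rw [if_pos h, if_pos (show pvOdd x = true from decide_eq_true h), List.foldl_cons, ih]
    · rw [if_neg h, if_neg (show ¬ pvOdd x = true by simpa [pvOdd] using h)]
      exact ih m

lemma pvFold_none (l : List Int) :
    l.foldl pvStep none =
      (if (l.filter pvOdd).isEmpty then none
       else PySem.List.max? (l.filter pvOdd) (fun x => x)) := by
  induction l with
  | nil => simp
  | cons x t ih =>
    rw [List.foldl_cons, List.filter_cons]
    by_cases h : PySem.Int.mod x 2 ≠ 0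
    · have hb : pvOdd x = true := decide_eq_true h
      simp only [hb, if_true]
      rw [show pvStep none x = some x from if_pos h,
        pvFold_some, PySem.List.max?_id_cons]
      simp only [List.isEmpty_cons, Bool.false_eq_true, if_false]
    · have hb : pvOdd x = false := by simpa [pvOdd] using h
      simp only [hb, Bool.false_eq_true, if_false]
      rw [show pvStep none x = none from if_neg h]
      exact ih

-- in a descending-pairwise list, the first element satisfying p bounds every element satisfying p
lemma pvFind_bound (p : Int → Bool) :
    ∀ (l : List Int), l.Pairwise (fun a b => b ≤ a) →
      ∀ m, l.find? p = some m → ∀ y ∈ l, p y = true → y ≤ m := by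
  intro l
  induction l with
  | nil => intro _ m hm; simp at hm
  | cons a t ih =>
    intro hp m hm y hy hpy
    rw [List.pairwise_cons] at hp
    by_cases ha : p a = true
    · rw [List.find?_cons_of_pos ha] at hm
      obtain rfl : a = m := by injection hm
      rcases List.mem_cons.mp hy with rfl | hy'
      · exact le_refl _
      · exact hp.1 y hy'
    · rw [List.find?_cons_of_neg (by simpa using ha)] at hm
      rcases List.mem_cons.mp hy with rfl | hy'
      · exact absurd hpy ha
      · exact ih hp.2 m hm y hy' hpy

-- B's find? over the descending sort equals "none if no odds, else the maximum odd"
lemma pvAlt_eq (lista : List Int) :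
    mayor_inpar_alt lista =
      (if (lista.filter pvOdd).isEmpty then none
       else PySem.List.max? (lista.filter pvOdd) (fun x => x)) := by
  unfold mayor_inpar_alt
  set s := PySem.List.sorted lista (fun x => x) true with hs
  have hmem : ∀ y : Int, y ∈ s ↔ y ∈ lista := fun y => PySem.List.mem_sorted lista (fun x => x) true y
  cases hf : s.find? pvOdd with
  | none =>
    have hnone : ∀ y ∈ lista, pvOdd y = false := by
      intro y hy
      have := List.find?_eq_none.mp hf y ((hmem y).mpr hy)
      simpa using this
    have : lista.filter pvOdd = [] := List.filter_eq_nil_iff.mpr (by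
      intro y hy
      simp [hnone y hy])
    rw [this]
    simp only [List.isEmpty_nil, if_true]
    rw [List.find?_eq_none]
    intro y hy
    have h0 : pvOdd y = false := hnone y ((hmem y).mp hy)
    simpa [pvOdd] using h0
  | some m =>
    have hm_mem : m ∈ lista := (hmem m).mp (List.mem_of_find?_eq_some hf)
    have hm_odd : pvOdd m = true := List.find?_some hf
    have hm_filter : m ∈ lista.filter pvOdd := List.mem_filter.mpr ⟨hm_mem, hm_odd⟩
    have hne : (lista.filter pvOdd).isEmpty = false := by
      cases h : lista.filter pvOdd with
      | nil => rw [h] at hm_filter; simp at hm_filter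
      | cons a t => simp
    rw [if_neg (by simp [hne])]
    have hbound : ∀ y ∈ lista, pvOdd y = true → y ≤ m := by
      intro y hy hpy
      exact pvFind_bound pvOdd s (PySem.List.sorted_pairwise_rev lista (fun x => x)) m hf y ((hmem y).mpr hy) hpy
    cases hmax : PySem.List.max? (lista.filter pvOdd) (fun x => x) with
    | none =>
      exact absurd (List.eq_nil_iff_forall_not_mem.mp
        (((Iff.mp (PySem.List.max?_eq_none_iff (lista.filter pvOdd) (fun x => x))) hmax)) m) (by exact fun h => h hm_filter)
    | some v =>
      have hv_mem : v ∈ lista.filter pvOdd := PySem.List.max?_mem hmax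
      have hv_max : ∀ y ∈ lista.filter pvOdd, y ≤ v := by
        intro y hy
        simpa using PySem.List.max?_isMax hmax y hy
      have h1 : m ≤ v := hv_max m hm_filter
      have h2 : v ≤ m := by
        obtain ⟨hv_in, hv_odd⟩ := List.mem_filter.mp hv_mem
        exact hbound v hv_in hv_odd
      exact (le_antisymm h1 h2) ▸ hf

-- ===== VERDICT =====
theorem mayor_inpar_spec : Claim_equal_mayor_inpar := by
  intro lista _
  show mayor_inpar lista = mayor_inpar_alt lista
  rw [pvAlt_eq]
  exact (PySem.List.foldl_pyRange_zero_pyGetD' lista 0 pvStep none).trans (pvFold_none lista)
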